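-- pv_equiv track=rewrite | github.com/sonyaxent/vahnovan_python_tasks | height_problem_task.py | func_depth
-- ===== SOURCE A (Python) =====
-- def func_depth(height_list):
--     right_side_list = []
--     left_side_list = []
--     for _ in reversed(height_list):
--
--         if _ > min(height_list):
--             right_side_list.append(_)
--         else:
--             break
--
--     right_side = max(right_side_list) - min(height_list)
--
--     for i in height_list:
--         if i > min(height_list):
--             left_side_list.append(i)
--         else:
--             break
--
--     left_side = max(left_side_list) - min(height_list)
--
--     return min(left_side, right_side)
-- ===== SOURCE B (Python) =====
-- def func_depth(height_list):
--     m = min(height_list)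
--     i = height_list.index(m)
--     j = len(height_list) - 1 - height_list[::-1].index(m)
--     return min(max(height_list[:i]), max(height_list[j + 1:])) - m
-- ===== Notes on version B (the rewrite author's own statement) =====
-- stated objective: faster
-- what changed: B locates the first and last positions of the minimum with list.index on the list and its reversal and takes max over the two slices around them, instead of A's break-loops that rebuild min() each iteration and accumulate side lists element by element.
import Mathlib
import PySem

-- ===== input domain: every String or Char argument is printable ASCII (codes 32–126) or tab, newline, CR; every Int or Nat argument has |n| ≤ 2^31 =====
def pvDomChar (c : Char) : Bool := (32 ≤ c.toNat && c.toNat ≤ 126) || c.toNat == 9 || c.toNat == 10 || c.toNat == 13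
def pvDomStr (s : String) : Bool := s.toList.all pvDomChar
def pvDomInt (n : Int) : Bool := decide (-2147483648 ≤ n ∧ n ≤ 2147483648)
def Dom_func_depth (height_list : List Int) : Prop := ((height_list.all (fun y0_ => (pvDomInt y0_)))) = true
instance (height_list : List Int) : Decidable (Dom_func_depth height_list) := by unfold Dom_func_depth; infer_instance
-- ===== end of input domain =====

-- ===== PORT A =====
-- B locates the first/last positions of the minimum by list.index on the list and its
-- reversal and takes max over the slices around them (single passes); A recomputes min()
-- inside every loop iteration and accumulates side lists element by element (O(n^2) vs O(n)).

-- helper for A: the loop 'append while _ > min(height_list) else break'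
def buildSide (hl : List Int) : List Int → List Int
  | [] => []
  | x :: xs =>
    if (PySem.List.min? hl (fun y => y)).getD 0 < x then x :: buildSide hl xs else []

def func_depth (height_list : List Int) : Int :=
  let right_side_list := buildSide height_list height_list.reverse
  let right_side := (PySem.List.max? right_side_list (fun y => y)).getD 0
      - (PySem.List.min? height_list (fun y => y)).getD 0
  let left_side_list := buildSide height_list height_list
  let left_side := (PySem.List.max? left_side_list (fun y => y)).getD 0
      - (PySem.List.min? height_list (fun y => y)).getD 0
  min left_side right_side

-- ===== PORT B =====
def func_depth_alt (height_list : List Int) : Int :=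
  let m := (PySem.List.min? height_list (fun y => y)).getD 0
  let i : Nat := (PySem.List.index? height_list m).getD 0
  let rev := (PySem.List.slice? height_list none none (-1)).getD []
  let j : Int := (height_list.length : Int) - 1 - ((PySem.List.index? rev m).getD 0 : Nat)
  min ((PySem.List.max? (PySem.List.slice height_list none (some (i : Int))) (fun y => y)).getD 0)
      ((PySem.List.max? (PySem.List.slice height_list (some (j + 1)) none) (fun y => y)).getD 0)
    - m

-- ===== PRECONDITION & SPEC =====
-- Pre_ excludes exactly the inputs where Python A raises ValueError (min/max of an empty
-- sequence): the empty list, or a list whose first or last element equals its minimum.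
def Pre_func_depth (height_list : List Int) : Prop :=
  height_list ≠ [] ∧
  (PySem.List.min? height_list (fun y => y)).getD 0 < height_list.head?.getD 0 ∧
  (PySem.List.min? height_list (fun y => y)).getD 0 < height_list.getLast?.getD 0
instance (height_list : List Int) : Decidable (Pre_func_depth height_list) := by
  unfold Pre_func_depth; infer_instance
def pvWitness_func_depth : List Int := [3, 1, 4]
def Spec_func_depth (height_list : List Int) (out : Int) : Prop := out = func_depth_alt height_list
instance (height_list : List Int) (out : Int) : Decidable (Spec_func_depth height_list out) := by unfold Spec_func_depth; infer_instance

-- ===== CLAIM (what is proved, stated in full; the proofs are below) =====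
def Claim_equal_func_depth : Prop := ∀ (height_list : List Int), Dom_func_depth height_list → Pre_func_depth height_list → Spec_func_depth height_list (func_depth height_list)

-- ===== LEMMAS AND PROOFS =====

-- A's loop with the threshold m precomputed
def buildSide' (m : Int) : List Int → List Int
  | [] => []
  | x :: xs => if m < x then x :: buildSide' m xs else []

theorem buildSide_eq (hl : List Int) (xs : List Int) :
    buildSide hl xs = buildSide' ((PySem.List.min? hl (fun y => y)).getD 0) xs := by
  induction xs with
  | nil => rfl
  | cons x t ih => simp [buildSide, buildSide', ih]

-- A's loop stops exactly at the first occurrence of the minimum: it returns the prefix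
theorem buildSide'_prefix (m : Int) (pre suf : List Int) (h : ∀ x ∈ pre, m < x) :
    buildSide' m (pre ++ m :: suf) = pre := by
  induction pre with
  | nil => simp [buildSide']
  | cons x t ih =>
    simp [buildSide', h x (by simp), ih (fun y hy => h y (by simp [hy]))]

-- max(l) as a value is invariant under reversal
theorem maxD_reverse (l : List Int) :
    (PySem.List.max? l.reverse (fun y => y)).getD 0
      = (PySem.List.max? l (fun y => y)).getD 0 := by
  cases h : PySem.List.max? l (fun y => y) with
  | none =>
    have hl : l = [] := (PySem.List.max?_eq_none_iff l _).1 h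
    subst hl; rfl
  | some M =>
    cases h2 : PySem.List.max? l.reverse (fun y => y) with
    | none =>
      have : l.reverse = [] := (PySem.List.max?_eq_none_iff l.reverse _).1 h2
      have hl : l = [] := by simpa using this
      subst hl; simp [PySem.List.max?] at h
    | some M' =>
      have hM'mem : M' ∈ l := by
        have := PySem.List.max?_mem h2; simpa using this
      have hMmem : M ∈ l.reverse := by
        have := PySem.List.max?_mem h; simpa using this
      have h1 : M' ≤ M := PySem.List.max?_isMax h M' hM'mem
      have h2' : M ≤ M' := PySem.List.max?_isMax h2 M hMmem
      simp
      omega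

-- ===== VERDICT (by name: the statement is the Claim_ definition above) =====
theorem func_depth_spec : Claim_equal_func_depth := by
  intro hl _ hpre
  obtain ⟨hne, -, -⟩ := hpre
  unfold Spec_func_depth func_depth func_depth_alt
  -- the minimum m of the nonempty list
  obtain ⟨m, hm⟩ : ∃ m, PySem.List.min? hl (fun y => y) = some m := by
    cases h : PySem.List.min? hl (fun y => y) with
    | none => exact absurd ((PySem.List.min?_eq_none_iff hl _).1 h) hne
    | some m => exact ⟨m, rfl⟩
  have hmmem : m ∈ hl := PySem.List.min?_mem hm
  have hmmin : ∀ y ∈ hl, m ≤ y := PySem.List.min?_isMin hm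
  -- decompose hl at the first occurrence of m
  obtain ⟨k, hk⟩ : ∃ k, PySem.List.index? hl m = some k := by
    have := (PySem.List.index?_isSome_iff hl m).2 hmmem
    exact Option.isSome_iff_exists.mp this
  obtain ⟨pre, suf, hdecomp, hklen, hnotpre⟩ := (PySem.List.index?_eq_some_iff hl m k).1 hk
  -- decompose hl.reverse at the first occurrence of m
  obtain ⟨r, hr⟩ : ∃ r, PySem.List.index? hl.reverse m = some r := by
    have := (PySem.List.index?_isSome_iff hl.reverse m).2 (by simpa using hmmem)
    exact Option.isSome_iff_exists.mp this
  obtain ⟨preR, sufR, hdecompR, hrlen, hnotpreR⟩ :=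
    (PySem.List.index?_eq_some_iff hl.reverse m r).1 hr
  -- elements before the first occurrence of the minimum are strictly above it
  have hpreGt : ∀ x ∈ pre, m < x := by
    intro x hx
    have hmem : x ∈ hl := by rw [hdecomp]; exact List.mem_append_left _ hx
    have hne' : x ≠ m := fun hxeq => hnotpre (hxeq ▸ hx)
    have := hmmin x hmem; omega
  have hpreRGt : ∀ x ∈ preR, m < x := by
    intro x hx
    have hmem : x ∈ hl := by
      rw [← List.mem_reverse, hdecompR]; exact List.mem_append_left _ hx
    have hne' : x ≠ m := fun hxeq => hnotpreR (hxeq ▸ hx)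
    have := hmmin x hmem; omega
  -- hl written from the right-hand decomposition
  have hl_eq : hl = sufR.reverse ++ [m] ++ preR.reverse := by
    have := congrArg List.reverse hdecompR
    simpa [List.reverse_append] using this
  -- A's two side lists
  have hleftA : buildSide hl hl = pre := by
    rw [buildSide_eq, hm, Option.getD_some, hdecomp]
    exact buildSide'_prefix m pre suf hpreGt
  have hrightA : buildSide hl hl.reverse = preR := by
    rw [buildSide_eq, hm, Option.getD_some, hdecompR]
    exact buildSide'_prefix m preR sufR hpreRGt
  -- B's left slice is the same prefix
  have hsliceL : PySem.List.slice hl none (some ((k : Nat) : Int)) = pre := by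
    rw [PySem.List.slice_to_natCast, hdecomp, ← hklen, List.take_left]
  -- B's right slice is A's right side list reversed
  have hrlt : r < hl.length := by
    have : r < hl.reverse.length := by
      rw [hdecompR, ← hrlen]; simp
    simpa using this
  have hsliceR : PySem.List.slice hl (some (((hl.length : Int) - 1 - (r : Nat)) + 1)) none
      = preR.reverse := by
    rw [PySem.List.slice_from hl (a := ((hl.length : Int) - 1 - (r : Nat)) + 1) (by omega)]
    have hlenR : hl.length = sufR.length + 1 + preR.length := by
      rw [hl_eq]; simp; omega
    have hrval : r = preR.length := by
      rw [← hrlen]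
    have htoNat : ((hl.length : Int) - 1 - (r : Nat) + 1).toNat = sufR.length + 1 := by
      omega
    rw [htoNat, hl_eq]
    rw [show sufR.reverse ++ [m] ++ preR.reverse = (sufR.reverse ++ [m]) ++ preR.reverse from by simp]
    rw [show sufR.length + 1 = (sufR.reverse ++ [m]).length from by simp]
    exact List.drop_left
  -- put it together
  simp only [hm, Option.getD_some, hk, hr, PySem.List.slice?_none_none_neg_one,
    hsliceL, hsliceR, hleftA, hrightA]
  rw [maxD_reverse preR]
  omega
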